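-- pv_equiv track=rewrite | github.com/MickSBWalker/SK-Stuff | SK.py | CollapseWord
-- ===== SOURCE A (Python) =====
-- def CollapseWord(word):
--     #Shortens a word if possible.
--     done = False
--     i = 0
--     while not done:
--         if i >= len(word)-1:
--             return word
--         if word[i] == -1*word[i+1]:
--             del word[i:i+2]
--             i=0
--         else:
--             i+=1
-- ===== SOURCE B (Python) =====
-- def CollapseWord(word):
--     # Single-pass stack reduction (O(n)). Unlike A, does not mutate `word`;
--     # returns the same reduced sequence as a new list.
--     stack = []
--     for x in word:
--         if stack and stack[-1] == -x:
--             stack.pop()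
--         else:
--             stack.append(x)
--     return stack
-- ===== Notes on version B (the rewrite author's own statement) =====
-- stated objective: faster
-- what changed: Replaced A's restart-from-zero scan with repeated slice deletions by a single-pass stack that pops when the top equals the negation of the current element.
import Mathlib
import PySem

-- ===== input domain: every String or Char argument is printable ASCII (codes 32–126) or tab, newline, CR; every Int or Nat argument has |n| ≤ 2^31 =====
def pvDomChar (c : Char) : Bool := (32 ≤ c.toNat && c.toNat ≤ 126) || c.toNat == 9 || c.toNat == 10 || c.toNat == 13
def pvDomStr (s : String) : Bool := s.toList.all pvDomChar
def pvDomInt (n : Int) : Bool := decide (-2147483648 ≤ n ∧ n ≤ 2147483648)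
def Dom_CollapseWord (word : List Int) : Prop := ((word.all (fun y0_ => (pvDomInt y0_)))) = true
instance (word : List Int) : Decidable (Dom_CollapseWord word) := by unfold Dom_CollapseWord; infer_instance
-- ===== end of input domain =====

-- B replaces A's quadratic restart-from-zero deletion scan by a single-pass stack
-- (pop when the top is the negation of the current element); A mutates `word` in place,
-- the equivalence proved here is about the return value.


-- ===== PORT A =====
-- `i` in A starts at 0, is reset to 0 or incremented, so it is a Nat; the guard
-- `i >= len(word)-1` is taken over Int exactly as Python computes it.
-- `del word[i:i+2]` is word[:i] ++ word[i+2:], ported with PySem slices.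
def CollapseWordLoop (word : List Int) (i : Nat) : List Int :=
  if (i : Int) ≥ (word.length : Int) - 1 then word
  else if PySem.List.pyGetD word (i : Int) 0 = -1 * PySem.List.pyGetD word ((i : Int) + 1) 0 then
    CollapseWordLoop (PySem.List.slice word none (some (i : Int)) ++
                      PySem.List.slice word (some ((i : Int) + 2)) none) 0
  else
    CollapseWordLoop word (i + 1)
termination_by (word.length, word.length - i)
decreasing_by
  · apply Prod.Lex.left
    have h2 : ((i : Int)) + 2 = (((i + 2 : Nat)) : Int) := by push_cast; ring
    rw [h2, PySem.List.slice_to_natCast, PySem.List.slice_from_natCast]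
    simp only [List.length_append, List.length_take, List.length_drop]
    omega
  · apply Prod.Lex.right
    omega

def CollapseWord (word : List Int) : List Int := CollapseWordLoop word 0

-- ===== PORT B =====
-- the Python stack (append/pop at the end) is kept top-at-head here and reversed at return
def altStep (st : List Int) (x : Int) : List Int :=
  match st with
  | [] => [x]
  | t :: rest => if t = -x then rest else x :: t :: rest

def CollapseWord_alt (word : List Int) : List Int := (word.foldl altStep []).reverse

-- ===== PRECONDITION & SPEC =====
def Spec_CollapseWord (word : List Int) (out : List Int) : Prop := out = CollapseWord_alt word
instance (word : List Int) (out : List Int) : Decidable (Spec_CollapseWord word out) := by unfold Spec_CollapseWord; infer_instance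

-- ===== CLAIM (what is proved, stated in full; the proofs are below) =====
def Claim_equal_CollapseWord : Prop := ∀ (word : List Int), Dom_CollapseWord word → Spec_CollapseWord word (CollapseWord word)

-- ===== LEMMAS AND PROOFS =====

-- "no adjacent cancelling pair": holds of the stack at all times and of a fully reduced word
def NoCancel (a b : Int) : Prop := a ≠ -b

theorem altStep_chain {st : List Int} (x : Int) (h : List.IsChain NoCancel st) :
    List.IsChain NoCancel (altStep st x) := by
  cases st with
  | nil => simp [altStep, List.isChain_cons]
  | cons t rest =>
    by_cases hc : t = -x
    · simpa [altStep, hc] using h.tail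
    · have hxt : NoCancel x t := by unfold NoCancel; omega
      simp only [altStep, if_neg hc]
      exact List.isChain_cons.2 ⟨by simpa using hxt, h⟩

theorem foldl_chain (xs : List Int) :
    ∀ st : List Int, List.IsChain NoCancel st → List.IsChain NoCancel (xs.foldl altStep st) := by
  induction xs with
  | nil => intro st h; simpa using h
  | cons x xs ih => intro st h; exact ih _ (altStep_chain x h)

-- pushing then cancelling returns the stack unchanged, provided the stack is reduced
theorem altStep_cancel {st : List Int} (a b : Int) (hst : List.IsChain NoCancel st)
    (hab : a = -b) : altStep (altStep st a) b = st := by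
  cases st with
  | nil => simp [altStep, hab]
  | cons t rest =>
    by_cases hc : t = -a
    · cases rest with
      | nil => subst hab; simp [altStep, hc]
      | cons u rest' =>
        have hu : NoCancel t u := by simpa using (List.isChain_cons.1 hst).1
        have hub : ¬ u = -b := by unfold NoCancel at hu; omega
        subst hab; simp [altStep, hc, hub]
    · subst hab
      have hc' : ¬ t = b := by omega
      simp [altStep, hc']

-- a fully reduced word passes through the stack untouched
theorem foldl_reduced (xs : List Int) :
    ∀ st : List Int, List.IsChain NoCancel (st.reverse ++ xs) →
      xs.foldl altStep st = xs.reverse ++ st := by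
  induction xs with
  | nil => intro st _; simp
  | cons x xs ih =>
    intro st h
    have hstep : altStep st x = x :: st := by
      cases st with
      | nil => rfl
      | cons t rest =>
        have htx : NoCancel t x := by
          rcases List.isChain_append.1 h with ⟨-, -, hlink⟩
          exact hlink t (by simp) x (by simp)
        unfold NoCancel at htx
        simp [altStep, htx]
    have h' : List.IsChain NoCancel ((x :: st).reverse ++ xs) := by
      simpa [List.append_assoc] using h
    calc (x :: xs).foldl altStep st = xs.foldl altStep (x :: st) := by rw [List.foldl_cons, hstep]
      _ = xs.reverse ++ (x :: st) := ih _ h'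
      _ = (x :: xs).reverse ++ st := by simp

-- deleting an adjacent cancelling pair does not change the stack result
theorem fold_delete_pair (u v : List Int) (a b : Int) (hab : a = -b) :
    (u ++ a :: b :: v).foldl altStep [] = (u ++ v).foldl altStep [] := by
  have hst : List.IsChain NoCancel (u.foldl altStep []) := foldl_chain u [] (by simp)
  simp only [List.foldl_append, List.foldl_cons]
  rw [altStep_cancel a b hst hab]

-- the decomposition of word at a valid index pair
theorem split_at_pair (word : List Int) (i : Nat) (h : i + 1 < word.length) :
    word = word.take i ++ word[i] :: word[i+1] :: word.drop (i + 2) := by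
  conv_lhs => rw [← List.take_append_drop i word]
  rw [List.drop_eq_getElem_cons (by omega), List.drop_eq_getElem_cons (by omega)]

-- main loop invariant: once all pairs before i are known non-cancelling, the loop
-- computes exactly the stack reduction
theorem loop_eq (word : List Int) (i : Nat)
    (H : ∀ j : Nat, (hj : j + 1 < word.length) → j < i → word[j] ≠ -word[j+1]) :
    CollapseWordLoop word i = CollapseWord_alt word := by
  induction word, i using CollapseWordLoop.induct with
  | case1 word i hge =>
    rw [CollapseWordLoop, if_pos hge]
    have hch : List.IsChain NoCancel word := by
      rw [List.isChain_iff_getElem]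
      intro j hj
      exact H j (by omega) (by omega)
    unfold CollapseWord_alt
    rw [foldl_reduced word [] (by simpa using hch)]
    simp
  | case2 word i hge hcancel ih =>
    rw [CollapseWordLoop, if_neg hge, if_pos hcancel]
    have hi1 : i + 1 < word.length := by omega
    have h2 : ((i : Int)) + 2 = (((i + 2 : Nat)) : Int) := by push_cast; ring
    rw [ih (by intro j hj hj0; omega)]
    have hab : word[i] = -word[i+1] := by
      have e1 : PySem.List.pyGetD word (i : Int) 0 = word[i] := by
        rw [PySem.List.pyGetD_natCast, List.getD_eq_getElem word 0 (by omega)]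
      have e2 : PySem.List.pyGetD word ((i : Int) + 1) 0 = word[i+1] := by
        have : ((i : Int)) + 1 = (((i + 1 : Nat)) : Int) := by push_cast; ring
        rw [this, PySem.List.pyGetD_natCast, List.getD_eq_getElem word 0 (by omega)]
      rw [e1, e2] at hcancel
      omega
    unfold CollapseWord_alt
    rw [h2, PySem.List.slice_to_natCast, PySem.List.slice_from_natCast]
    conv_rhs => rw [split_at_pair word i hi1]
    rw [fold_delete_pair _ _ _ _ hab]
  | case3 word i hge hcancel ih =>
    rw [CollapseWordLoop, if_neg hge, if_neg hcancel]
    apply ih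
    intro j hj hj0
    rcases Nat.lt_succ_iff_lt_or_eq.1 hj0 with hlt | rfl
    · exact H j hj hlt
    · have e1 : PySem.List.pyGetD word ((j : Int)) 0 = word[j] := by
        rw [PySem.List.pyGetD_natCast, List.getD_eq_getElem word 0 (by omega)]
      have e2 : PySem.List.pyGetD word ((j : Int) + 1) 0 = word[j+1] := by
        have hc : ((j : Int)) + 1 = (((j + 1 : Nat)) : Int) := by push_cast; ring
        rw [hc, PySem.List.pyGetD_natCast, List.getD_eq_getElem word 0 (by omega)]
      rw [e1, e2] at hcancel
      intro hcontra
      exact hcancel (by omega)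

-- ===== VERDICT (by name: the statement is the Claim_ definition above) =====
theorem CollapseWord_spec : Claim_equal_CollapseWord := by
  intro word _
  unfold Spec_CollapseWord CollapseWord
  exact loop_eq word 0 (by intro j hj hj0; omega)
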